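-- pv_equiv track=rewrite | github.com/Clean-Code0244/PythonCodeStepByStepSolutions | PythonCodeStepByStep/collections/list/remove_even_length.py | remove_even_length
-- ===== SOURCE A (Python) =====
-- def remove_even_length(list):
--
--     i = 0
--     while i < len(list):
--         if len(list[i]) % 2 == 0:
--             list.remove(list[i])
--         else:
--             i += 1
--     return  list
-- ===== SOURCE B (Python) =====
-- def remove_even_length(list):
--     w = 0
--     for x in list:
--         if len(x) % 2 == 1:
--             list[w] = x
--             w += 1
--     del list[w:]
--     return list
-- ===== Notes on version B (the rewrite author's own statement) =====
-- stated objective: faster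
-- what changed: Replaced the while-loop that calls list.remove (a rescan from the front for every even-length element) with a single forward pass using a write pointer that compacts kept odd-length elements in place and truncates once.
import Mathlib
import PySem

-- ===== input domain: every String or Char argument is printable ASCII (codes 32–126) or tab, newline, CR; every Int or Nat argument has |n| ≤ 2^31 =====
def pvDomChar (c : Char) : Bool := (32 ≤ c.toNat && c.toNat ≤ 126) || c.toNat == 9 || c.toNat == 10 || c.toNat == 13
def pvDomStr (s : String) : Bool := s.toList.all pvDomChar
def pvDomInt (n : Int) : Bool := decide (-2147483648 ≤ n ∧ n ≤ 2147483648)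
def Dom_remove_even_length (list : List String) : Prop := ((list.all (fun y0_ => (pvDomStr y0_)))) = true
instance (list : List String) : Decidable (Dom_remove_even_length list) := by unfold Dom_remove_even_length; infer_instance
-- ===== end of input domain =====

-- B replaces A's while-loop with repeated list.remove rescans by a single-pass write-pointer
-- compaction (objective: faster, measured).
-- Note: both A and B mutate the argument list in place in Python; the equivalence proved here
-- is about the returned value (which is the same mutated list object in both).

-- ===== PORT A =====
-- the while loop: i is the running index; on an even-length list[i], list.remove(list[i]) (first match)
def remove_even_length_go (xs : List String) (i : Nat) : List String :=
  if h : i < xs.length then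
    if PySem.Int.mod (PySem.Str.len xs[i]) 2 == 0 then
      remove_even_length_go ((PySem.List.remove? xs xs[i]).getD xs) i
    else
      remove_even_length_go xs (i + 1)
  else xs
termination_by xs.length - i
decreasing_by
  · have hm : xs[i] ∈ xs := List.getElem_mem h
    rw [PySem.List.remove?_eq_some_erase xs _ hm]
    have := List.length_erase_of_mem hm
    simp [this]
    omega
  · omega

def remove_even_length (list : List String) : List String :=
  remove_even_length_go list 0

-- ===== PORT B =====
-- single forward pass with a write pointer: the accumulator is the prefix already written
def remove_even_length_alt (list : List String) : List String :=
  list.foldl (fun acc x => if PySem.Int.mod (PySem.Str.len x) 2 == 1 then acc ++ [x] else acc) []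

-- ===== PRECONDITION & SPEC =====
def Spec_remove_even_length (list : List String) (out : List String) : Prop := out = remove_even_length_alt list
instance (list : List String) (out : List String) : Decidable (Spec_remove_even_length list out) := by unfold Spec_remove_even_length; infer_instance

-- ===== CLAIM (what is proved, stated in full; the proofs are below) =====
def Claim_equal_remove_even_length : Prop := ∀ (list : List String), Dom_remove_even_length list → Spec_remove_even_length list (remove_even_length list)

-- ===== LEMMAS AND PROOFS =====

def pvOdd (x : String) : Bool := PySem.Int.mod (PySem.Str.len x) 2 == 1

theorem pvOdd_iff (x : String) :
    (PySem.Int.mod (PySem.Str.len x) 2 == 0) = false ↔ pvOdd x = true := by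
  rcases PySem.Int.mod_two_eq (PySem.Str.len x) with h | h <;> simp [pvOdd, h]

theorem remove?_append_cons_self (pre rest : List String) (x : String)
    (hx : x ∉ pre) : PySem.List.remove? (pre ++ x :: rest) x = some (pre ++ rest) := by
  induction pre with
  | nil => simp
  | cons p ps ih =>
      have hpx : p ≠ x := by intro he; exact hx (by simp [he])
      have hxps : x ∉ ps := fun h => hx (List.mem_cons_of_mem _ h)
      simp [PySem.List.remove?_cons_of_ne _ hpx, ih hxps]

theorem go_eq_filter (suf pre : List String) (hpre : ∀ x ∈ pre, pvOdd x = true) :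
    remove_even_length_go (pre ++ suf) pre.length = pre ++ suf.filter pvOdd := by
  induction suf generalizing pre with
  | nil =>
      rw [remove_even_length_go]
      simp
  | cons x rest ih =>
      have hlen : pre.length < (pre ++ x :: rest).length := by simp
      have hget : (pre ++ x :: rest)[pre.length] = x := by
        simp
      rw [remove_even_length_go]
      simp only [hlen, dif_pos, hget]
      by_cases hx : pvOdd x = true
      · have hev : (PySem.Int.mod (PySem.Str.len x) 2 == 0) = false := (pvOdd_iff x).mpr hx
        rw [hev]
        simp only [Bool.false_eq_true, if_false]
        have : pre ++ x :: rest = (pre ++ [x]) ++ rest := by simp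
        rw [show pre.length + 1 = (pre ++ [x]).length by simp, this]
        rw [ih (pre ++ [x]) (by intro y hy; rcases List.mem_append.mp hy with h | h
                                · exact hpre y h
                                · simp at h; subst h; exact hx)]
        simp [List.filter_cons, hx]
      · have hev : (PySem.Int.mod (PySem.Str.len x) 2 == 0) = true := by
          rcases Bool.eq_false_or_eq_true (PySem.Int.mod (PySem.Str.len x) 2 == 0) with h | h
          · exact h
          · exact absurd ((pvOdd_iff x).mp h) hx
        rw [hev]
        simp only [if_true]
        have hxpre : x ∉ pre := by
          intro hmem; exact hx (hpre x hmem)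
        rw [remove?_append_cons_self pre rest x hxpre]
        simp only [Option.getD_some]
        rw [ih pre hpre]
        simp [List.filter_cons, hx]

theorem alt_eq_filter (list : List String) :
    remove_even_length_alt list = list.filter pvOdd := by
  unfold remove_even_length_alt
  rw [PySem.List.foldl_append_if_eq_filter]
  rfl

-- ===== VERDICT (by name: the statement is the Claim_ definition above) =====
theorem remove_even_length_spec : Claim_equal_remove_even_length := by
  intro list _
  show remove_even_length list = remove_even_length_alt list
  rw [alt_eq_filter]
  have := go_eq_filter list [] (by intro x h; cases h)
  simpa [remove_even_length] using this
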